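-- pv_equiv track=rewrite | github.com/frenzy2004/sentry | sentrysearch/ui.py | _prioritize_source_variety
-- ===== SOURCE A (Python) =====
-- def _prioritize_source_variety(
--     results: list[dict],
--     max_per_source: int = 1,
-- ) -> list[dict]:
--     """Order results so each source video gets a chance before repeats."""
--     if max_per_source <= 0:
--         return list(results)
--
--     primary: list[dict] = []
--     overflow: list[dict] = []
--     counts: dict[str, int] = {}
--     for result in results:
--         source = str(result["source_file"])
--         current = counts.get(source, 0)
--         if current < max_per_source:
--             primary.append(result)
--             counts[source] = current + 1
--         else:
--             overflow.append(result)
--     return primary + overflow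
-- ===== SOURCE B (Python) =====
-- def _prioritize_source_variety(
--     results: list[dict],
--     max_per_source: int = 1,
-- ) -> list[dict]:
--     """Order results so each source video gets a chance before repeats."""
--     if max_per_source <= 0:
--         return list(results)
--
--     sources = dict.fromkeys(str(r["source_file"]) for r in results)
--     chosen = sorted(
--         i
--         for s in sources
--         for i in [j for j, r in enumerate(results)
--                   if str(r["source_file"]) == s][:max_per_source]
--     )
--     picked = set(chosen)
--     return [results[i] for i in chosen] + \
--            [r for j, r in enumerate(results) if j not in picked]
-- ===== Notes on version B (the rewrite author's own statement) =====
-- stated objective: alternative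
-- what changed: Instead of one pass splitting into primary/overflow with a running counts dict, B builds a per-source index of occurrence positions, takes the first max_per_source positions of each source, sorts those positions to restore original order, and emits the remaining results by set-membership on positions.
import Mathlib
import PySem

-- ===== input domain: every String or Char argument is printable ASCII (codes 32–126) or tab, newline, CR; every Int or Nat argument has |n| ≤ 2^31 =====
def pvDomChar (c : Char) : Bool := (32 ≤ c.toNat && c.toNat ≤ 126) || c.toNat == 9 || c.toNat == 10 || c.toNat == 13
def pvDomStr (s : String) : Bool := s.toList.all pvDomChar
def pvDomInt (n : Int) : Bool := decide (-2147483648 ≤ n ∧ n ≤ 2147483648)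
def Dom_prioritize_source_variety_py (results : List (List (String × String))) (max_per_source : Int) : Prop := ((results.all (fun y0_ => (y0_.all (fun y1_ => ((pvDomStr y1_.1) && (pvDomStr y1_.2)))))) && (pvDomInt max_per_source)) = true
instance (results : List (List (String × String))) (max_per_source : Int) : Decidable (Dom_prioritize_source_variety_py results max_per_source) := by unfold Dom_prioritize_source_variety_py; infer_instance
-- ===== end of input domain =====

-- B replaces A's single counting pass (running counts dict, two accumulator lists) by a
-- per-source positional index: take each source's first max_per_source occurrence positions,
-- sort the selected positions to restore original order, emit the rest by position-set
-- membership (alternative decomposition, not faster).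

-- ===== PORT A =====
-- str(result["source_file"]): the dict values are strings, so str() is the identity.
-- Python raises KeyError when the key is absent — those inputs are excluded by Pre_;
-- the port reads "" there.
def pvSrc (result : List (String × String)) : String :=
  ((PySem.Dict.mk result).get? "source_file").getD ""

-- the body of A's for-loop, over the state (primary, overflow, counts)
def pvStepA (max_per_source : Int)
    (st : List (List (String × String)) × List (List (String × String)) × PySem.Dict String Int)
    (result : List (String × String)) :
    List (List (String × String)) × List (List (String × String)) × PySem.Dict String Int :=
  let source := pvSrc result
  let current := st.2.2.getD source 0
  if current < max_per_source then
    (st.1 ++ [result], st.2.1, st.2.2.insert source (current + 1))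
  else
    (st.1, st.2.1 ++ [result], st.2.2)

def prioritize_source_variety_py (results : List (List (String × String))) (max_per_source : Int) : List (List (String × String)) :=
  if max_per_source ≤ 0 then results
  else
    let st := results.foldl (pvStepA max_per_source) ([], [], PySem.Dict.empty)
    st.1 ++ st.2.1

-- ===== PORT B =====
-- [j for j, r in enumerate(results) if str(r["source_file"]) == s]
def pvOccIdx (results : List (List (String × String))) (s : String) : List Int :=
  ((PySem.List.enumerate results 0).filter (fun p => pvSrc p.2 == s)).map (fun p => p.1)

def prioritize_source_variety_py_alt (results : List (List (String × String))) (max_per_source : Int) : List (List (String × String)) :=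
  if max_per_source ≤ 0 then results
  else
    let sources := PySem.List.dedup (results.map pvSrc)
    let chosen := PySem.List.sorted
      (sources.flatMap (fun s => PySem.List.slice (pvOccIdx results s) none (some max_per_source)))
      (fun x => x) false
    let picked := PySem.Set.ofList chosen
    -- results[i]: every chosen i is a valid index, so the default of pyGetD is never read
    chosen.map (fun i => PySem.List.pyGetD results i []) ++
    ((PySem.List.enumerate results 0).filter (fun p => !(PySem.Set.contains picked p.1))).map (fun p => p.2)

-- ===== PRECONDITION & SPEC =====
-- Pre_ excludes exactly the inputs where Python A raises KeyError: max_per_source > 0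
-- and some result dict lacks the key "source_file".
def Pre_prioritize_source_variety_py (results : List (List (String × String))) (max_per_source : Int) : Prop :=
  max_per_source ≤ 0 ∨ ∀ r ∈ results, ((PySem.Dict.mk r).get? "source_file").isSome = true
instance (results : List (List (String × String))) (max_per_source : Int) : Decidable (Pre_prioritize_source_variety_py results max_per_source) := by unfold Pre_prioritize_source_variety_py; infer_instance

def pvWitness_prioritize_source_variety_py : (List (List (String × String))) × Int :=
  ([[("source_file", "a")], [("source_file", "a")], [("source_file", "b")]], 1)

def Spec_prioritize_source_variety_py (results : List (List (String × String))) (max_per_source : Int) (out : List (List (String × String))) : Prop := out = prioritize_source_variety_py_alt results max_per_source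
instance (results : List (List (String × String))) (max_per_source : Int) (out : List (List (String × String))) : Decidable (Spec_prioritize_source_variety_py results max_per_source out) := by unfold Spec_prioritize_source_variety_py; infer_instance

-- ===== CLAIM (what is proved, stated in full; the proofs are below) =====
def Claim_equal_prioritize_source_variety_py : Prop := ∀ (results : List (List (String × String))) (max_per_source : Int), Dom_prioritize_source_variety_py results max_per_source → Pre_prioritize_source_variety_py results max_per_source → Spec_prioritize_source_variety_py results max_per_source (prioritize_source_variety_py results max_per_source)

-- ===== LEMMAS AND PROOFS =====

-- how many of the already-processed results `pre` share source `s`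
def pvCnt (pre : List (List (String × String))) (s : String) : Nat :=
  pre.countP (fun r => pvSrc r == s)

-- the common specification: given processed prefix `pre`, split `rest` into (primary, overflow)
def pvGo (m : Int) (pre rest : List (List (String × String))) :
    List (List (String × String)) × List (List (String × String)) :=
  match rest with
  | [] => ([], [])
  | r :: rs =>
    let p := pvGo m (pre ++ [r]) rs
    if ((pvCnt pre (pvSrc r) : Int)) < m then (r :: p.1, p.2) else (p.1, r :: p.2)

-- absolute positions (offset pre.length) of the PRIMARY results of rest
def pvSel (m : Int) (pre rest : List (List (String × String))) : List Int :=
  match rest with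
  | [] => []
  | r :: rs =>
    if ((pvCnt pre (pvSrc r) : Int)) < m then (pre.length : Int) :: pvSel m (pre ++ [r]) rs
    else pvSel m (pre ++ [r]) rs

-- absolute positions (offset pre.length) of the occurrences of source s in rest
def pvOcc (s : String) (pre rest : List (List (String × String))) : List Int :=
  match rest with
  | [] => []
  | r :: rs =>
    if pvSrc r == s then (pre.length : Int) :: pvOcc s (pre ++ [r]) rs
    else pvOcc s (pre ++ [r]) rs

lemma pvCnt_append_singleton (pre : List (List (String × String))) (r : List (String × String)) (s : String) :
    pvCnt (pre ++ [r]) s = pvCnt pre s + (if pvSrc r == s then 1 else 0) := by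
  simp [pvCnt, List.countP_append, List.countP_cons]

lemma pvA_fold (m : Int) :
    ∀ (rest pre P O : List (List (String × String))) (counts : PySem.Dict String Int),
    (∀ s, counts.getD s 0 = min ((pvCnt pre s : Int)) m) →
      (rest.foldl (pvStepA m) (P, O, counts)).1 = P ++ (pvGo m pre rest).1 ∧
      (rest.foldl (pvStepA m) (P, O, counts)).2.1 = O ++ (pvGo m pre rest).2 := by
  intro rest
  induction rest with
  | nil => intro pre P O counts _; simp [pvGo]
  | cons r rs ih =>
    intro pre P O counts hinv
    have hcur : counts.getD (pvSrc r) 0 = min ((pvCnt pre (pvSrc r) : Int)) m := hinv _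
    by_cases hlt : ((pvCnt pre (pvSrc r) : Int)) < m
    · have hc : counts.getD (pvSrc r) 0 = (pvCnt pre (pvSrc r) : Int) := by omega
      have hstep : pvStepA m (P, O, counts) r =
          (P ++ [r], O, counts.insert (pvSrc r) ((pvCnt pre (pvSrc r) : Int) + 1)) := by
        simp [pvStepA, hc, hlt]
      have hinv' : ∀ s, (counts.insert (pvSrc r) ((pvCnt pre (pvSrc r) : Int) + 1)).getD s 0
          = min ((pvCnt (pre ++ [r]) s : Int)) m := by
        intro s
        rw [PySem.Dict.getD_insert, pvCnt_append_singleton]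
        by_cases hs : s = pvSrc r
        · subst hs; simp; omega
        · have : (pvSrc r == s) = false := by simp [Ne.symm hs]
          simp [hs, this, hinv s]
      have := ih (pre ++ [r]) (P ++ [r]) O (counts.insert (pvSrc r) ((pvCnt pre (pvSrc r) : Int) + 1)) hinv'
      simp only [List.foldl_cons, hstep]
      refine ⟨?_, ?_⟩
      · rw [this.1]; simp [pvGo, hlt]
      · rw [this.2]; simp [pvGo, hlt]
    · have hc : counts.getD (pvSrc r) 0 = m := by omega
      have hstep : pvStepA m (P, O, counts) r = (P, O ++ [r], counts) := by
        simp [pvStepA, hc]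
      have hinv' : ∀ s, counts.getD s 0 = min ((pvCnt (pre ++ [r]) s : Int)) m := by
        intro s
        rw [pvCnt_append_singleton]
        by_cases hs : s = pvSrc r
        · subst hs; simp; rw [hc]; omega
        · have : (pvSrc r == s) = false := by simp [Ne.symm hs]
          simp [this, hinv s]
      have := ih (pre ++ [r]) P (O ++ [r]) counts hinv'
      simp only [List.foldl_cons, hstep]
      refine ⟨?_, ?_⟩
      · rw [this.1]; simp [pvGo, hlt]
      · rw [this.2]; simp [pvGo, hlt]

-- every position in pvSel / pvOcc is ≥ pre.length
lemma pvSel_lb (m : Int) :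
    ∀ (rest pre : List (List (String × String))) (x : Int),
    x ∈ pvSel m pre rest → (pre.length : Int) ≤ x := by
  intro rest
  induction rest with
  | nil => intro pre x h; simp [pvSel] at h
  | cons r rs ih =>
    intro pre x h
    unfold pvSel at h
    by_cases hlt : ((pvCnt pre (pvSrc r) : Int)) < m
    · rw [if_pos hlt] at h
      rcases List.mem_cons.mp h with h0 | ht
      · omega
      · have := ih (pre ++ [r]) x ht; simp at this; omega
    · rw [if_neg hlt] at h
      have := ih (pre ++ [r]) x h; simp at this; omega

lemma pvOcc_lb (s : String) :
    ∀ (rest pre : List (List (String × String))) (x : Int),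
    x ∈ pvOcc s pre rest → (pre.length : Int) ≤ x := by
  intro rest
  induction rest with
  | nil => intro pre x h; simp [pvOcc] at h
  | cons r rs ih =>
    intro pre x h
    unfold pvOcc at h
    by_cases hs : (pvSrc r == s) = true
    · rw [if_pos hs] at h
      rcases List.mem_cons.mp h with h0 | ht
      · omega
      · have := ih (pre ++ [r]) x ht; simp at this; omega
    · rw [if_neg hs] at h
      have := ih (pre ++ [r]) x h; simp at this; omega

lemma pvSel_pairwise (m : Int) :
    ∀ (rest pre : List (List (String × String))), (pvSel m pre rest).Pairwise (· < ·) := by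
  intro rest
  induction rest with
  | nil => intro pre; simp [pvSel]
  | cons r rs ih =>
    intro pre
    unfold pvSel
    by_cases hlt : ((pvCnt pre (pvSrc r) : Int)) < m
    · rw [if_pos hlt]
      refine List.Pairwise.cons ?_ (ih (pre ++ [r]))
      intro x hx
      have := pvSel_lb m rs (pre ++ [r]) x hx; simp at this; omega
    · rw [if_neg hlt]; exact ih (pre ++ [r])

lemma pvOcc_pairwise (s : String) :
    ∀ (rest pre : List (List (String × String))), (pvOcc s pre rest).Pairwise (· < ·) := by
  intro rest
  induction rest with
  | nil => intro pre; simp [pvOcc]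
  | cons r rs ih =>
    intro pre
    unfold pvOcc
    by_cases hs : (pvSrc r == s) = true
    · rw [if_pos hs]
      refine List.Pairwise.cons ?_ (ih (pre ++ [r]))
      intro x hx
      have := pvOcc_lb s rs (pre ++ [r]) x hx; simp at this; omega
    · rw [if_neg hs]; exact ih (pre ++ [r])

-- B's occurrence-index comprehension equals pvOcc
lemma pvOcc_eq (s : String) :
    ∀ (rest pre : List (List (String × String))),
    ((PySem.List.enumerate rest (pre.length : Int)).filter (fun p => pvSrc p.2 == s)).map (fun p => p.1)
      = pvOcc s pre rest := by
  intro rest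
  induction rest with
  | nil => intro pre; simp [pvOcc, PySem.List.enumerate_nil]
  | cons r rs ih =>
    intro pre
    rw [PySem.List.enumerate_cons]
    have h1 : ((pre.length : Int) + 1) = (((pre ++ [r]).length : Int)) := by simp
    unfold pvOcc
    by_cases hs : (pvSrc r == s) = true
    · rw [if_pos hs]
      have hc : ((fun (p : Int × List (String × String)) => pvSrc p.2 == s) ((pre.length : Int), r)) = true := hs
      rw [List.filter_cons, if_pos hc, List.map_cons, h1, ih (pre ++ [r])]
    · rw [if_neg hs]
      have hc : ¬ ((fun (p : Int × List (String × String)) => pvSrc p.2 == s) ((pre.length : Int), r)) = true := hs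
      rw [List.filter_cons, if_neg hc, h1, ih (pre ++ [r])]

-- membership in pvSel: exactly the positions whose prefix count is below m
lemma pvSel_mem (m : Int) :
    ∀ (rest pre : List (List (String × String))) (i : Int),
    i ∈ pvSel m pre rest ↔ ∃ (j : Nat) (r : List (String × String)), rest[j]? = some r ∧
      i = ((pre.length + j : Nat) : Int) ∧ ((pvCnt (pre ++ rest.take j) (pvSrc r) : Int)) < m := by
  intro rest
  induction rest with
  | nil => intro pre i; simp [pvSel]
  | cons r rs ih =>
    intro pre i
    unfold pvSel
    constructor
    · intro hm
      by_cases hlt : ((pvCnt pre (pvSrc r) : Int)) < m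
      · rw [if_pos hlt] at hm
        rcases List.mem_cons.mp hm with h0 | ht
        · exact ⟨0, r, by simp, by simpa using h0, by simpa using hlt⟩
        · rcases (ih (pre ++ [r]) i).mp ht with ⟨j, r', hj, hi, hc⟩
          refine ⟨j + 1, r', by simpa using hj, ?_, ?_⟩
          · simp at hi ⊢; omega
          · have he : pre ++ (r :: rs).take (j + 1) = (pre ++ [r]) ++ rs.take j := by simp
            rw [he]; exact hc
      · rw [if_neg hlt] at hm
        rcases (ih (pre ++ [r]) i).mp hm with ⟨j, r', hj, hi, hc⟩
        refine ⟨j + 1, r', by simpa using hj, ?_, ?_⟩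
        · simp at hi ⊢; omega
        · have he : pre ++ (r :: rs).take (j + 1) = (pre ++ [r]) ++ rs.take j := by simp
          rw [he]; exact hc
    · rintro ⟨j, r', hj, hi, hc⟩
      cases j with
      | zero =>
        simp at hj
        subst hj
        simp only [List.take_zero, List.append_nil] at hc
        rw [if_pos hc]
        simp at hi
        rw [hi]
        exact List.mem_cons_self
      | succ j =>
        simp only [List.getElem?_cons_succ] at hj
        have he : pre ++ (r :: rs).take (j + 1) = (pre ++ [r]) ++ rs.take j := by simp
        rw [he] at hc
        have hi' : i = ((((pre ++ [r]).length + j : Nat)) : Int) := by simp at hi ⊢; omega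
        have htail : i ∈ pvSel m (pre ++ [r]) rs := (ih (pre ++ [r]) i).mpr ⟨j, r', hj, hi', hc⟩
        by_cases hlt : ((pvCnt pre (pvSrc r) : Int)) < m
        · rw [if_pos hlt]; exact List.mem_cons_of_mem _ htail
        · rw [if_neg hlt]; exact htail

-- membership in pvOcc: exactly the positions holding source s
lemma pvOcc_mem (s : String) :
    ∀ (rest pre : List (List (String × String))) (i : Int),
    i ∈ pvOcc s pre rest ↔ ∃ (j : Nat) (r : List (String × String)), rest[j]? = some r ∧
      i = ((pre.length + j : Nat) : Int) ∧ pvSrc r = s := by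
  intro rest
  induction rest with
  | nil => intro pre i; simp [pvOcc]
  | cons r rs ih =>
    intro pre i
    unfold pvOcc
    constructor
    · intro hm
      by_cases hs : (pvSrc r == s) = true
      · rw [if_pos hs] at hm
        rcases List.mem_cons.mp hm with h0 | ht
        · exact ⟨0, r, by simp, by simpa using h0, by simpa using hs⟩
        · rcases (ih (pre ++ [r]) i).mp ht with ⟨j, r', hj, hi, hc⟩
          exact ⟨j + 1, r', by simpa using hj, by simp at hi ⊢; omega, hc⟩
      · rw [if_neg hs] at hm
        rcases (ih (pre ++ [r]) i).mp hm with ⟨j, r', hj, hi, hc⟩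
        exact ⟨j + 1, r', by simpa using hj, by simp at hi ⊢; omega, hc⟩
    · rintro ⟨j, r', hj, hi, hc⟩
      cases j with
      | zero =>
        simp at hj
        subst hj
        have hs : (pvSrc r == s) = true := by simpa using hc
        rw [if_pos hs]
        simp at hi
        rw [hi]
        exact List.mem_cons_self
      | succ j =>
        simp only [List.getElem?_cons_succ] at hj
        have hi' : i = ((((pre ++ [r]).length + j : Nat)) : Int) := by simp at hi ⊢; omega
        have htail : i ∈ pvOcc s (pre ++ [r]) rs := (ih (pre ++ [r]) i).mpr ⟨j, r', hj, hi', hc⟩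
        by_cases hs : (pvSrc r == s) = true
        · rw [if_pos hs]; exact List.mem_cons_of_mem _ htail
        · rw [if_neg hs]; exact htail

-- how many occurrence positions lie strictly before absolute position pre.length + j
lemma pvOcc_count (s : String) :
    ∀ (rest pre : List (List (String × String))) (j : Nat),
    (pvOcc s pre rest).countP (fun y => decide (y < ((pre.length + j : Nat) : Int)))
      = pvCnt (rest.take j) s := by
  intro rest
  induction rest with
  | nil => intro pre j; simp [pvOcc, pvCnt]
  | cons r rs ih =>
    intro pre j
    cases j with
    | zero =>
      rw [List.take_zero]
      have h0 : (pvOcc s pre (r :: rs)).countP (fun y => decide (y < ((pre.length + 0 : Nat) : Int))) = 0 := by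
        rw [List.countP_eq_zero]
        intro x hx
        have := pvOcc_lb s (r :: rs) pre x hx
        simp; omega
      rw [h0]; simp [pvCnt]
    | succ j =>
      unfold pvOcc
      have ht := ih (pre ++ [r]) j
      have hb : (((pre ++ [r]).length + j : Nat) : Int) = ((pre.length + (j + 1) : Nat) : Int) := by
        simp; omega
      rw [hb] at ht
      by_cases hs : (pvSrc r == s) = true
      · rw [if_pos hs, List.countP_cons]
        rw [ht]
        have hd : (decide ((pre.length : Int) < ((pre.length + (j + 1) : Nat) : Int))) = true := by
          simp
        rw [hd]
        simp [pvCnt, hs]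
      · rw [if_neg hs, ht]
        simp [pvCnt, hs]

-- membership in the first k elements of a strictly increasing list
lemma pv_mem_take_iff {l : List Int} (h : l.Pairwise (· < ·)) (k : Nat) (x : Int) :
    x ∈ l.take k ↔ x ∈ l ∧ l.countP (fun y => decide (y < x)) < k := by
  induction l generalizing k with
  | nil => simp
  | cons a l ih =>
    rcases List.pairwise_cons.mp h with ⟨ha, hl⟩
    cases k with
    | zero => simp
    | succ k =>
      rw [List.take_succ_cons]
      simp only [List.mem_cons, List.countP_cons]
      by_cases hx : x = a
      · subst hx
        have h0 : l.countP (fun y => decide (y < x)) = 0 := by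
          rw [List.countP_eq_zero]
          intro y hy
          have := ha y hy
          simp; omega
        simp [h0]
      · rw [ih hl]
        by_cases hxl : x ∈ l
        · have hax : a < x := ha x hxl
          simp only [hx, false_or, hxl, true_and]
          have hd : (decide (a < x)) = true := by simpa using hax
          simp only [hd, if_true]
          omega
        · simp [hx, hxl]

-- selected positions, read back from the list, give the primary results in order
lemma pvSel_map_get (m : Int) :
    ∀ (rest pre : List (List (String × String))),
    (pvSel m pre rest).map (fun i => PySem.List.pyGetD (pre ++ rest) i ([] : List (String × String)))
      = (pvGo m pre rest).1 := by
  intro rest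
  induction rest with
  | nil => intro pre; simp [pvSel, pvGo]
  | cons r rs ih =>
    intro pre
    have he : pre ++ r :: rs = (pre ++ [r]) ++ rs := by simp
    have hget : PySem.List.pyGetD (pre ++ r :: rs) ((pre.length : Nat) : Int) ([] : List (String × String)) = r := by
      rw [PySem.List.pyGetD_natCast]
      simp [List.getD_eq_getElem?_getD]
    by_cases hlt : ((pvCnt pre (pvSrc r) : Int)) < m
    · have hgo : (pvGo m pre (r :: rs)).1 = r :: (pvGo m (pre ++ [r]) rs).1 := by simp [pvGo, hlt]
      have hsel : pvSel m pre (r :: rs) = (pre.length : Int) :: pvSel m (pre ++ [r]) rs := by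
        simp [pvSel, hlt]
      rw [hsel, hgo, List.map_cons, hget]
      congr 1
      rw [he]; exact ih (pre ++ [r])
    · have hgo : (pvGo m pre (r :: rs)).1 = (pvGo m (pre ++ [r]) rs).1 := by simp [pvGo, hlt]
      have hsel : pvSel m pre (r :: rs) = pvSel m (pre ++ [r]) rs := by simp [pvSel, hlt]
      rw [hsel, hgo, he]
      exact ih (pre ++ [r])

-- the results whose position fails the selection test are the overflow, in order
lemma pvOverflow (m : Int) :
    ∀ (rest pre : List (List (String × String))) (f : Int → Bool),
    (∀ (j : Nat) (r : List (String × String)), rest[j]? = some r →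
        f ((pre.length + j : Nat) : Int) = decide (((pvCnt (pre ++ rest.take j) (pvSrc r) : Int)) < m)) →
    ((PySem.List.enumerate rest (pre.length : Int)).filter (fun p => !(f p.1))).map (fun p => p.2)
      = (pvGo m pre rest).2 := by
  intro rest
  induction rest with
  | nil => intro pre f _; simp [pvGo, PySem.List.enumerate_nil]
  | cons r rs ih =>
    intro pre f hf
    have h1 : ((pre.length : Int) + 1) = (((pre ++ [r]).length : Int)) := by simp
    rw [PySem.List.enumerate_cons, h1, List.filter_cons]
    have hf0 : f ((pre.length : Nat) : Int) = decide (((pvCnt pre (pvSrc r) : Int)) < m) := by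
      have := hf 0 r (by simp)
      simpa using this
    have hftail : ∀ (j : Nat) (r' : List (String × String)), rs[j]? = some r' →
        f (((pre ++ [r]).length + j : Nat) : Int)
          = decide (((pvCnt ((pre ++ [r]) ++ rs.take j) (pvSrc r') : Int)) < m) := by
      intro j r' hj
      have hh := hf (j + 1) r' (by simpa using hj)
      have he : pre ++ (r :: rs).take (j + 1) = (pre ++ [r]) ++ rs.take j := by simp
      rw [he] at hh
      have hb : (((pre ++ [r]).length + j : Nat) : Int) = ((pre.length + (j + 1) : Nat) : Int) := by
        simp; omega
      rw [hb]
      exact hh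
    by_cases hlt : ((pvCnt pre (pvSrc r) : Int)) < m
    · have hgo : (pvGo m pre (r :: rs)).2 = (pvGo m (pre ++ [r]) rs).2 := by simp [pvGo, hlt]
      have hcond : ¬ ((fun (p : Int × List (String × String)) => !(f p.1)) ((pre.length : Int), r)) = true := by
        simp [hf0, hlt]
      rw [if_neg hcond, hgo]
      exact ih (pre ++ [r]) f hftail
    · have hgo : (pvGo m pre (r :: rs)).2 = r :: (pvGo m (pre ++ [r]) rs).2 := by simp [pvGo, hlt]
      have hcond : ((fun (p : Int × List (String × String)) => !(f p.1)) ((pre.length : Int), r)) = true := by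
        simp [hf0, hlt]
      rw [if_pos hcond, List.map_cons, hgo]
      congr 1
      exact ih (pre ++ [r]) f hftail

-- ===== VERDICT (by name: the statement is the Claim_ definition above) =====
theorem prioritize_source_variety_py_spec : Claim_equal_prioritize_source_variety_py := by
  intro results m _ _
  unfold Spec_prioritize_source_variety_py prioritize_source_variety_py prioritize_source_variety_py_alt
  by_cases h : m ≤ 0
  · simp [h]
  · simp only [h, if_false]
    have hinv0 : ∀ s, (PySem.Dict.empty : PySem.Dict String Int).getD s 0
        = min ((pvCnt [] s : Int)) m := by
      intro s; simp [pvCnt]; omega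
    have hA := pvA_fold m results [] [] [] PySem.Dict.empty hinv0
    have hocc : ∀ s, pvOccIdx results s = pvOcc s [] results := by
      intro s
      have := pvOcc_eq s results []
      simpa [pvOccIdx] using this
    have hslice : ∀ s, PySem.List.slice (pvOccIdx results s) none (some m)
        = (pvOcc s [] results).take m.toNat := by
      intro s
      have h0m : (0 : Int) ≤ m := by omega
      rw [PySem.List.slice_to _ h0m, hocc]
    have hflat_mem : ∀ i : Int,
        i ∈ (PySem.List.dedup (results.map pvSrc)).flatMap
            (fun s => PySem.List.slice (pvOccIdx results s) none (some m))
        ↔ i ∈ pvSel m [] results := by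
      intro i
      rw [List.mem_flatMap]
      constructor
      · rintro ⟨s, hsmem, hstake⟩
        rw [hslice s, pv_mem_take_iff (pvOcc_pairwise s results [])] at hstake
        rcases hstake with ⟨hio, hcnt⟩
        rcases (pvOcc_mem s results [] i).mp hio with ⟨j, r, hj, hi, hr⟩
        rw [hi] at hcnt
        have hcc := pvOcc_count s results [] j
        rw [hcc] at hcnt
        refine (pvSel_mem m results [] i).mpr ⟨j, r, hj, hi, ?_⟩
        rw [List.nil_append, hr]
        omega
      · intro hsel
        rcases (pvSel_mem m results [] i).mp hsel with ⟨j, r, hj, hi, hc⟩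
        refine ⟨pvSrc r, ?_, ?_⟩
        · rw [PySem.List.mem_dedup]
          exact List.mem_map_of_mem (List.mem_of_getElem? hj)
        · rw [hslice _, pv_mem_take_iff (pvOcc_pairwise _ results [])]
          refine ⟨(pvOcc_mem _ results [] i).mpr ⟨j, r, hj, hi, rfl⟩, ?_⟩
          rw [hi, pvOcc_count (pvSrc r) results [] j]
          rw [List.nil_append] at hc
          omega
    have hsel_nodup : (pvSel m [] results).Nodup :=
      (pvSel_pairwise m results []).imp (fun hlt => ne_of_lt hlt)
    have hdisj : ∀ s t, s ≠ t →
        List.Disjoint (PySem.List.slice (pvOccIdx results s) none (some m))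
          (PySem.List.slice (pvOccIdx results t) none (some m)) := by
      intro s t hst i his hit
      rw [hslice s] at his
      rw [hslice t] at hit
      rcases (pvOcc_mem s results [] i).mp (List.mem_of_mem_take his) with ⟨j, r, hj, hi, hr⟩
      rcases (pvOcc_mem t results [] i).mp (List.mem_of_mem_take hit) with ⟨j', r', hj', hi', hr'⟩
      have hjj : j = j' := by rw [hi] at hi'; simp at hi'; omega
      subst hjj
      rw [hj] at hj'
      cases hj'
      exact hst (hr ▸ hr' ▸ rfl)
    have hflat_nodup : ((PySem.List.dedup (results.map pvSrc)).flatMap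
        (fun s => PySem.List.slice (pvOccIdx results s) none (some m))).Nodup := by
      rw [List.flatMap_def, List.nodup_flatten]
      constructor
      · intro l' hl'
        rcases List.mem_map.mp hl' with ⟨s, _, rfl⟩
        rw [hslice s]
        exact ((pvOcc_pairwise s results []).sublist (List.take_sublist _ _)).imp
          (fun hlt => ne_of_lt hlt)
      · rw [List.pairwise_map]
        exact (PySem.List.nodup_dedup _).imp (fun hne => hdisj _ _ hne)
    have hperm : (pvSel m [] results).Perm
        ((PySem.List.dedup (results.map pvSrc)).flatMap
          (fun s => PySem.List.slice (pvOccIdx results s) none (some m))) :=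
      (List.perm_ext_iff_of_nodup hsel_nodup hflat_nodup).mpr (fun a => (hflat_mem a).symm)
    have hchosen : PySem.List.sorted
        ((PySem.List.dedup (results.map pvSrc)).flatMap
          (fun s => PySem.List.slice (pvOccIdx results s) none (some m)))
        (fun x => x) false = pvSel m [] results :=
      PySem.List.sorted_eq_of_perm_of_pairwise_lt _ _ (fun x => x) hperm (pvSel_pairwise m results [])
    rw [hA.1, hA.2, hchosen]
    have hprim := pvSel_map_get m results []
    simp only [List.nil_append] at hprim
    have hhyp : ∀ (j : Nat) (r : List (String × String)), results[j]? = some r →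
        (fun i => PySem.Set.contains (PySem.Set.ofList (pvSel m [] results)) i)
            (((([] : List (List (String × String))).length + j : Nat)) : Int)
          = decide (((pvCnt (([] : List (List (String × String))) ++ results.take j) (pvSrc r) : Int)) < m) := by
      intro j r hj
      simp only [List.length_nil, Nat.zero_add, List.nil_append]
      have hiff : ((j : Nat) : Int) ∈ pvSel m [] results ↔ ((pvCnt (results.take j) (pvSrc r) : Int)) < m := by
        rw [pvSel_mem]
        constructor
        · rintro ⟨j', r', hj', hi, hc⟩
          have hjj : j = j' := by simp at hi; exact_mod_cast hi
          subst hjj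
          rw [hj] at hj'
          cases hj'
          rw [List.nil_append] at hc
          exact hc
        · intro hc
          exact ⟨j, r, hj, by simp, by simpa using hc⟩
      by_cases hmem : ((j : Nat) : Int) ∈ pvSel m [] results
      · have h1 : PySem.Set.contains (PySem.Set.ofList (pvSel m [] results)) ((j : Nat) : Int) = true :=
          (PySem.Set.contains_iff _ _).mpr ((PySem.Set.mem_ofList _ _).mpr hmem)
        rw [h1, eq_comm, decide_eq_true_eq]
        exact hiff.mp hmem
      · have h1 : PySem.Set.contains (PySem.Set.ofList (pvSel m [] results)) ((j : Nat) : Int) = false := by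
          rw [Bool.eq_false_iff]
          intro hcontra
          exact hmem ((PySem.Set.mem_ofList _ _).mp ((PySem.Set.contains_iff _ _).mp hcontra))
        rw [h1, eq_comm, decide_eq_false_iff_not]
        exact fun hc => hmem (hiff.mpr hc)
    have hover := pvOverflow m results []
      (fun i => PySem.Set.contains (PySem.Set.ofList (pvSel m [] results)) i) hhyp
    simp only [List.length_nil, Nat.cast_zero] at hover
    rw [hprim, hover]
    simp
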